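-- pv_equiv track=rewrite | github.com/cielavenir/codeiq_solutions | kawazoe/tyama_codeiq1560.py | solve
-- ===== SOURCE A (Python) =====
-- from functools import reduce
-- import itertools
--
-- def solve(factor,ma):
-- 	r=0
-- 	for n in range(1,len(factor)+1):
-- 		for a in itertools.combinations(factor,n):
-- 			divisor=reduce(lambda x,y:x*y,a)
-- 			items=ma//divisor
-- 			items_sum=items*(items+1)//2
-- 			r+=(-1)**((n-1)%2) * items_sum*divisor
-- 	return r
-- ===== SOURCE B (Python) =====
-- def solve(factor, ma):
--     # Recursive include/exclude over the factor list, threading the current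
--     # divisor and sign as accumulators (no subset enumeration, no reduce).
--     def go(fs, d, s, inc):
--         if not fs:
--             if not inc:
--                 return 0
--             items = ma // d
--             return s * (items * (items + 1) // 2) * d
--         return go(fs[1:], d, s, inc) + go(fs[1:], d * fs[0], -s, True)
--     return go(factor, 1, -1, False)
-- ===== Notes on version B (the rewrite author's own statement) =====
-- stated objective: alternative
-- what changed: Replaces the two nested loops over itertools.combinations (sizes 1..n) plus a reduce-product per subset with a single include/exclude recursion over the factor list that threads the running divisor and alternating sign as accumulators.
import Mathlib
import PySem

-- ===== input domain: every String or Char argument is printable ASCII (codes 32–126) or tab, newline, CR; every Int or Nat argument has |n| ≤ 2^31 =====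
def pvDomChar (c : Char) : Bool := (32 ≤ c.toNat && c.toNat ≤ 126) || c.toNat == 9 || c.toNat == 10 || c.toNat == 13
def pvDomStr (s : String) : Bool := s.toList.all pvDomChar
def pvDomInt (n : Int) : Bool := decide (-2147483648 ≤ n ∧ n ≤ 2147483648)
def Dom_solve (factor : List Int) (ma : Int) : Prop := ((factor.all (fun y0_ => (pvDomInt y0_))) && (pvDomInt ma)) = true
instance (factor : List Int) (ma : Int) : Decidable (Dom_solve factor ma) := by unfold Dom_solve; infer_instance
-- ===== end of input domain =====

-- B replaces A's nested loops over itertools.combinations (plus a reduce-product per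
-- subset) with one include/exclude recursion threading divisor and sign accumulators.


-- ===== PORT A =====
-- itertools.combinations(xs, n), in itertools' order
def pyCombos : List Int → Nat → List (List Int)
  | _, 0 => [[]]
  | [], _ + 1 => []
  | x :: rest, n + 1 => ((pyCombos rest n).map (x :: ·)) ++ pyCombos rest (n + 1)

-- reduce(lambda x,y: x*y, a); a is always nonempty here (n ≥ 1), the [] case is never hit
def reduceMul : List Int → Int
  | [] => 0
  | h :: t => t.foldl (· * ·) h

def solve (factor : List Int) (ma : Int) : Int :=
  (PySem.List.pyRange 1 ((factor.length : Int) + 1) 1).foldl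
    (fun r n =>
      -- divisor = reduceMul a; items = ma // divisor; items_sum = items*(items+1)//2
      (pyCombos factor n.toNat).foldl
        (fun r a =>
          r + (-1 : Int) ^ (((n - 1) % 2).toNat)
            * PySem.Int.floordiv
                (PySem.Int.floordiv ma (reduceMul a) * (PySem.Int.floordiv ma (reduceMul a) + 1)) 2
            * reduceMul a)
        r)
    0

-- ===== PORT B =====
def goB (ma : Int) : List Int → Int → Int → Bool → Int
  | [], d, s, inc =>
      if !inc then 0
      else
        let items := PySem.Int.floordiv ma d
        s * PySem.Int.floordiv (items * (items + 1)) 2 * d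
  | f :: fs, d, s, inc => goB ma fs d s inc + goB ma fs (d * f) (-s) true

def solve_alt (factor : List Int) (ma : Int) : Int := goB ma factor 1 (-1) false

-- ===== PRECONDITION & SPEC =====
-- Pre_ excludes lists containing 0: there A raises ZeroDivisionError (ma // 0), and B raises too.
def Pre_solve (factor : List Int) (ma : Int) : Prop := (0 : Int) ∉ factor
instance (factor : List Int) (ma : Int) : Decidable (Pre_solve factor ma) := by unfold Pre_solve; infer_instance
def pvWitness_solve : List Int × Int := ([3, 5], 20)

def Spec_solve (factor : List Int) (ma : Int) (out : Int) : Prop := out = solve_alt factor ma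
instance (factor : List Int) (ma : Int) (out : Int) : Decidable (Spec_solve factor ma out) := by unfold Spec_solve; infer_instance

-- ===== CLAIM (what is proved, stated in full; the proofs are below) =====
def Claim_equal_solve : Prop := ∀ (factor : List Int) (ma : Int), Dom_solve factor ma → Pre_solve factor ma → Spec_solve factor ma (solve factor ma)

-- ===== LEMMAS AND PROOFS =====

-- the per-subset contribution, as a function of the subset's product d
def term (ma d : Int) : Int :=
  PySem.Int.floordiv (PySem.Int.floordiv ma d * (PySem.Int.floordiv ma d + 1)) 2 * d

-- A's summand for a subset c drawn at outer index n
def wN (ma : Int) (n : Nat) (c : List Int) : Int :=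
  (-1 : Int) ^ ((n - 1) % 2) * term ma (reduceMul c)

-- B's summand for a subset T (specialised to d = 1, s = -1, inc = false)
def wB (ma : Int) (T : List Int) : Int :=
  if false || !T.isEmpty then (-1 : Int) * (-1 : Int) ^ T.length * term ma (1 * T.prod) else 0

lemma term_zero (ma : Int) : term ma 0 = 0 := by simp [term]

lemma neg_one_pow_mod_two (n : Nat) : ((-1 : Int)) ^ (n % 2) = (-1 : Int) ^ n := by
  conv_rhs => rw [← Nat.div_add_mod n 2]
  rw [pow_add, pow_mul]
  norm_num

lemma foldl_mul_init (t : List Int) (a : Int) : t.foldl (· * ·) a = a * t.prod := by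
  induction t generalizing a with
  | nil => simp
  | cons x t ih => simp [List.foldl_cons, ih, List.prod_cons, mul_assoc]

lemma reduceMul_eq_prod (h : Int) (t : List Int) : reduceMul (h :: t) = (h :: t).prod := by
  simp [reduceMul, foldl_mul_init, List.prod_cons]

lemma pyCombos_length : ∀ (xs : List Int) (n : Nat), ∀ c ∈ pyCombos xs n, c.length = n := by
  intro xs
  induction xs with
  | nil =>
    intro n c hc
    cases n with
    | zero => simp [pyCombos] at hc; simp [hc]
    | succ k => simp [pyCombos] at hc
  | cons x rest ih =>
    intro n c hc
    cases n with
    | zero => simp [pyCombos] at hc; simp [hc]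
    | succ k =>
      simp only [pyCombos, List.mem_append, List.mem_map] at hc
      rcases hc with ⟨c', hc', rfl⟩ | hc
      · simp [ih k c' hc']
      · exact ih (k + 1) c hc

lemma pyCombos_big : ∀ (xs : List Int) (n : Nat), xs.length < n → pyCombos xs n = [] := by
  intro xs
  induction xs with
  | nil => intro n h; cases n with
    | zero => omega
    | succ k => rfl
  | cons x rest ih =>
    intro n h
    cases n with
    | zero => omega
    | succ k =>
      simp at h
      simp [pyCombos, ih k (by omega), ih (k + 1) (by omega)]

lemma range_sum_head (F : Nat → Int) (m : Nat) :
    ((List.range (m + 1)).map F).sum = F 0 + ((List.range m).map (fun k => F (k + 1))).sum := by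
  rw [List.range_succ_eq_map]
  simp [List.map_map, Function.comp_def]

-- sum over n = 0..len of sums over pyCombos = sum over sublists'
lemma combos_range_sum (g : List Int → Int) :
    ∀ xs : List Int,
      ((List.range (xs.length + 1)).map (fun n => ((pyCombos xs n).map g).sum)).sum
        = ((xs.sublists').map g).sum := by
  intro xs
  induction xs generalizing g with
  | nil => simp [pyCombos, List.sublists']
  | cons x rest ih =>
    have hstep : ∀ k : Nat,
        ((pyCombos (x :: rest) (k + 1)).map g).sum
          = ((pyCombos rest k).map (fun c => g (x :: c))).sum
            + ((pyCombos rest (k + 1)).map g).sum := by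
      intro k
      simp [pyCombos, List.map_append, List.map_map, Function.comp_def]
    have hshift :
        g [] + ((List.range (rest.length + 1)).map
            (fun k => ((pyCombos rest (k + 1)).map g).sum)).sum
          = ((List.range (rest.length + 1)).map
              (fun n => ((pyCombos rest n).map g).sum)).sum := by
      have h2 := range_sum_head (fun n => ((pyCombos rest n).map g).sum) (rest.length + 1)
      have h3 :
          ((List.range (rest.length + 2)).map
              (fun n => ((pyCombos rest n).map g).sum)).sum
            = ((List.range (rest.length + 1)).map
                (fun n => ((pyCombos rest n).map g).sum)).sum := by
        rw [List.range_succ (n := rest.length + 1)]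
        simp [pyCombos_big rest (rest.length + 1) (by omega)]
      simp only [pyCombos, List.map_cons, List.sum_cons, List.map_nil, List.sum_nil,
        add_zero] at h2
      rw [← h3, h2]
    calc
      ((List.range ((x :: rest).length + 1)).map
          (fun n => ((pyCombos (x :: rest) n).map g).sum)).sum
          = g [] + ((List.range (rest.length + 1)).map
              (fun k => ((pyCombos (x :: rest) (k + 1)).map g).sum)).sum := by
            have := range_sum_head (fun n => ((pyCombos (x :: rest) n).map g).sum)
              (rest.length + 1)
            simpa [pyCombos] using this
      _ = g [] + (((List.range (rest.length + 1)).map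
              (fun k => ((pyCombos rest k).map (fun c => g (x :: c))).sum)).sum
            + ((List.range (rest.length + 1)).map
              (fun k => ((pyCombos rest (k + 1)).map g).sum)).sum) := by
            rw [List.map_congr_left (fun k _ => hstep k)]
            rw [PySem.List.sum_map_add_int]
      _ = ((List.range (rest.length + 1)).map
              (fun k => ((pyCombos rest k).map (fun c => g (x :: c))).sum)).sum
            + (g [] + ((List.range (rest.length + 1)).map
              (fun k => ((pyCombos rest (k + 1)).map g).sum)).sum) := by ring
      _ = ((rest.sublists').map (fun c => g (x :: c))).sum + ((rest.sublists').map g).sum := by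
            rw [hshift, ih g, ih (fun c => g (x :: c))]
      _ = (((x :: rest).sublists').map g).sum := by
            rw [List.sublists'_cons]
            simp only [List.map_append, List.sum_append, List.map_map, Function.comp_def]
            ring

lemma goB_eq_sum (ma : Int) :
    ∀ (xs : List Int) (d s : Int) (inc : Bool),
      goB ma xs d s inc
        = ((xs.sublists').map
            (fun T => if inc || !T.isEmpty then s * (-1 : Int) ^ T.length * term ma (d * T.prod) else 0)).sum := by
  intro xs
  induction xs with
  | nil =>
    intro d s inc
    cases inc <;> simp [goB, term, List.sublists', mul_assoc]
  | cons f fs ih =>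
    intro d s inc
    have h1 : goB ma (f :: fs) d s inc = goB ma fs d s inc + goB ma fs (d * f) (-s) true := rfl
    rw [h1, ih d s inc, ih (d * f) (-s) true, List.sublists'_cons]
    rw [List.map_append, List.sum_append, List.map_map]
    congr 1
    apply congrArg List.sum
    apply List.map_congr_left
    intro T _
    simp only [Function.comp, List.isEmpty_cons, Bool.or_true, List.length_cons,
      List.prod_cons, Bool.true_or, if_true, Bool.not_false, pow_succ]
    ring_nf

-- A's summand equals B's summand on every actual combination
lemma wN_eq_wB (ma : Int) (xs : List Int) (n : Nat) (c : List Int) (hc : c ∈ pyCombos xs n) :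
    wN ma n c = wB ma c := by
  cases n with
  | zero =>
    have : c = [] := by
      have := pyCombos_length xs 0 c hc
      exact List.eq_nil_of_length_eq_zero this
    subst this
    simp [wN, wB, reduceMul, term_zero]
  | succ k =>
    have hlen : c.length = k + 1 := pyCombos_length xs (k + 1) c hc
    cases c with
    | nil => simp at hlen
    | cons h t =>
      have ht : t.length = k := by simpa using hlen
      simp only [wN, wB, List.isEmpty_cons, Bool.not_false, Bool.false_or, if_true,
        reduceMul_eq_prod, List.length_cons, ht, one_mul]
      have hs : ((k + 1) - 1) % 2 = k % 2 := by omega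
      rw [hs, neg_one_pow_mod_two]
      rw [pow_succ]
      ring

lemma solve_eq_sum (factor : List Int) (ma : Int) :
    solve factor ma
      = ((List.range (factor.length + 1)).map
          (fun n => ((pyCombos factor n).map (wN ma n)).sum)).sum := by
  unfold solve
  have hinner : ∀ (n : Int) (l : List (List Int)) (r : Int),
      l.foldl
        (fun r a =>
          r + (-1 : Int) ^ (((n - 1) % 2).toNat)
            * PySem.Int.floordiv
                (PySem.Int.floordiv ma (reduceMul a) * (PySem.Int.floordiv ma (reduceMul a) + 1)) 2
            * reduceMul a)
        r
      = r + (l.map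
          (fun a => (-1 : Int) ^ (((n - 1) % 2).toNat) * term ma (reduceMul a))).sum := by
    intro n l
    induction l with
    | nil => simp
    | cons c l ih =>
      intro r
      simp only [List.foldl_cons, ih, List.map_cons, List.sum_cons, term]
      ring
  simp only [hinner]
  have houter : ∀ (l : List Int) (r0 : Int),
      l.foldl
        (fun r n => r + ((pyCombos factor n.toNat).map
          (fun a => (-1 : Int) ^ (((n - 1) % 2).toNat) * term ma (reduceMul a))).sum) r0
      = r0 + (l.map
          (fun n => ((pyCombos factor n.toNat).map
            (fun a => (-1 : Int) ^ (((n - 1) % 2).toNat) * term ma (reduceMul a))).sum)).sum := by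
    intro l
    induction l with
    | nil => simp
    | cons y l ih =>
      intro r0
      simp only [List.foldl_cons, ih, List.map_cons, List.sum_cons]
      ring
  rw [houter]
  rw [PySem.List.pyRange_one]
  have hlen : (((factor.length : Int) + 1) - 1).toNat = factor.length := by omega
  rw [hlen, List.map_map]
  rw [List.range_succ_eq_map, List.map_cons, List.sum_cons]
  have h0 : ((pyCombos factor 0).map (wN ma 0)).sum = 0 := by
    simp [pyCombos, wN, reduceMul, term_zero]
  rw [h0, List.map_map]
  simp only [zero_add]
  apply congrArg List.sum
  apply List.map_congr_left
  intro k _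
  simp only [Function.comp_def]
  have h1 : ((1 : Int) + k).toNat = k + 1 := by omega
  have h2 : ((((1 : Int) + k) - 1) % 2).toNat = (k + 1 - 1) % 2 := by omega
  rw [h1, h2]
  rfl

-- ===== VERDICT (by name: the statement is the Claim_ definition above) =====
theorem solve_spec : Claim_equal_solve := by
  intro factor ma _ _
  unfold Spec_solve
  rw [solve_eq_sum factor ma, solve_alt, goB_eq_sum ma factor 1 (-1) false]
  have hw : ∀ n : Nat, ((pyCombos factor n).map (wN ma n)).sum
      = ((pyCombos factor n).map (wB ma)).sum := by
    intro n
    exact congrArg List.sum (List.map_congr_left (fun c hc => wN_eq_wB ma factor n c hc))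
  simp only [hw]
  rw [combos_range_sum (wB ma) factor]
  apply congrArg List.sum
  apply List.map_congr_left
  intro T _
  simp [wB]
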